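-- pv_equiv track=rewrite | github.com/rishabhjain02/Data-Structures-And-Algorithms | Segment Trees/Bob and Queries.py | solve
-- ===== SOURCE A (Python) =====
-- def update1(A, st, start, end, index, pos):
--     if start == end and start == index:
--         st[pos] += 1
--         return
--
--     mid = (start + end)//2
--
--     if index <= mid:
--         update1(A, st, start, mid, index, 2*pos+1)
--     else:
--         update1(A, st, mid+1, end, index, 2*pos+2)
--
--     st[pos] = st[2*pos+1] + st[2*pos+2]
--
-- def update2(A, st, start, end, index, pos):
--     if start == end and start == index:
--         st[pos] -= 1
--         st[pos] = max(0, st[pos])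
--         return
--
--     mid = (start + end)//2
--
--     if index <= mid:
--         update2(A, st, start, mid, index, 2*pos+1)
--     else:
--         update2(A, st, mid+1, end, index, 2*pos+2)
--
--     st[pos] = st[2*pos+1] + st[2*pos+2]
--
-- def range_count(A, st, range_start, range_end, start, end, pos):
--     if range_start <= start and range_end >= end:
--         return st[pos]
--
--     if range_start > end or range_end < start:
--         return 0
--
--     mid = (start + end)//2
--
--     return range_count(A, st, range_start, range_end, start, mid, 2*pos+1) + range_count(A, st, range_start, range_end, mid+1, end, 2*pos+2)
--
-- def solve(A, B):
--     n = A
--     st = [0 for i in range(4*n)]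
--     ans = []
--
--     for query in B:
--         if query[0] == 1:
--             update1(A, st, 0, n-1, query[1]-1, 0)
--         elif query[0] == 2:
--             update2(A, st, 0, n-1, query[1]-1, 0)
--         else:
--             ans.append(range_count(A, st, query[1]-1, query[2]-1, 0, n-1, 0))
--
--     return ans
-- ===== SOURCE B (Python) =====
-- def solve(A, B):
--     n = A
--     cnt = [0] * n
--     ans = []
--     for q in B:
--         t = q[0]
--         if t == 1:
--             cnt[q[1] - 1] += 1
--         elif t == 2:
--             i = q[1] - 1
--             if cnt[i] > 0:
--                 cnt[i] -= 1
--         else: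
--             lo = max(q[1] - 1, 0)
--             hi = min(q[2] - 1, n - 1)
--             ans.append(sum(cnt[lo:hi + 1]) if lo <= hi else 0)
--     return ans
-- ===== Notes on version B (the rewrite author's own statement) =====
-- stated objective: simpler
-- what changed: Replaces the recursive segment tree (a 4n-node array with three recursive helpers) by a flat per-index count array updated in place, answering a range query by summing a slice of it directly.
import Mathlib
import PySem

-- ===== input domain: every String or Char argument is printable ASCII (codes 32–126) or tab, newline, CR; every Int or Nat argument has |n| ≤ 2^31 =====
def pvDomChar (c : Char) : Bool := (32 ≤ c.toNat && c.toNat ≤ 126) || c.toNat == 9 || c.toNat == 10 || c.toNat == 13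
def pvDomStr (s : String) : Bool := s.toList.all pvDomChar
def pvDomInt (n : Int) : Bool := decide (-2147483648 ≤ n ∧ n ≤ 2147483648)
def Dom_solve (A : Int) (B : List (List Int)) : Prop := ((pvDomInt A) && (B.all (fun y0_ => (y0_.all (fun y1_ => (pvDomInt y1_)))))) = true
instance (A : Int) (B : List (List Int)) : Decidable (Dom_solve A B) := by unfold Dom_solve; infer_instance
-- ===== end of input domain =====

-- ===== PORT A =====
-- B replaces A's recursive segment tree by a flat per-index count array (objective: simpler).
-- Port notes: the helper ports drop Python's unused first parameter `A`.  update1/update2 carry a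
-- fuel argument because Python's recursion is unbounded when `index` lies outside [start, end]
-- (RecursionError); Pre_solve excludes those inputs and the fuel n.toNat is proved sufficient there.
-- Python list reads/writes st[pos] are ported with the total pyGetD/pySetD forms: on Pre_solve every
-- such access is in range (Python's IndexError cases are exactly what Pre_solve excludes).

def update1 : Nat → List Int → Int → Int → Int → Int → List Int
  | 0, st, _, _, _, _ => st
  | f+1, st, s, e, idx, pos =>
    if s = e ∧ s = idx then
      PySem.List.pySetD st pos (PySem.List.pyGetD st pos 0 + 1)
    else
      let mid := PySem.Int.floordiv (s + e) 2
      let st' := if idx ≤ mid then update1 f st s mid idx (2*pos+1)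
                 else update1 f st (mid+1) e idx (2*pos+2)
      PySem.List.pySetD st' pos
        (PySem.List.pyGetD st' (2*pos+1) 0 + PySem.List.pyGetD st' (2*pos+2) 0)

def update2 : Nat → List Int → Int → Int → Int → Int → List Int
  | 0, st, _, _, _, _ => st
  | f+1, st, s, e, idx, pos =>
    if s = e ∧ s = idx then
      let st1 := PySem.List.pySetD st pos (PySem.List.pyGetD st pos 0 - 1)
      PySem.List.pySetD st1 pos (max 0 (PySem.List.pyGetD st1 pos 0))
    else
      let mid := PySem.Int.floordiv (s + e) 2
      let st' := if idx ≤ mid then update2 f st s mid idx (2*pos+1)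
                 else update2 f st (mid+1) e idx (2*pos+2)
      PySem.List.pySetD st' pos
        (PySem.List.pyGetD st' (2*pos+1) 0 + PySem.List.pyGetD st' (2*pos+2) 0)

def rangeCount (st : List Int) (rs re s e pos : Int) : Int :=
  if rs ≤ s ∧ re ≥ e then PySem.List.pyGetD st pos 0
  else if rs > e ∨ re < s then 0
  else
    rangeCount st rs re s (PySem.Int.floordiv (s + e) 2) (2*pos+1) +
    rangeCount st rs re (PySem.Int.floordiv (s + e) 2 + 1) e (2*pos+2)
termination_by (e - s).toNat
decreasing_by
  all_goals
    rw [PySem.Int.floordiv_eq_ediv_of_pos (by norm_num : (0:Int) < 2)]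
    omega

-- the body of Python's `for query in B` loop
def solveStep (n : Int) (acc : List Int × List Int) (query : List Int) : List Int × List Int :=
  if PySem.List.pyGetD query 0 0 = 1 then
    (update1 n.toNat acc.1 0 (n-1) (PySem.List.pyGetD query 1 0 - 1) 0, acc.2)
  else if PySem.List.pyGetD query 0 0 = 2 then
    (update2 n.toNat acc.1 0 (n-1) (PySem.List.pyGetD query 1 0 - 1) 0, acc.2)
  else
    (acc.1, acc.2 ++ [rangeCount acc.1 (PySem.List.pyGetD query 1 0 - 1)
        (PySem.List.pyGetD query 2 0 - 1) 0 (n-1) 0])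

def solve (A : Int) (B : List (List Int)) : List Int :=
  (B.foldl (solveStep A) ((PySem.List.pyRange 0 (4*A) 1).map fun _ => (0:Int), [])).2

-- ===== PORT B =====
-- the body of B's `for q in B` loop
def solveAltStep (n : Int) (acc : List Int × List Int) (q : List Int) : List Int × List Int :=
  if PySem.List.pyGetD q 0 0 = 1 then
    (PySem.List.pySetD acc.1 (PySem.List.pyGetD q 1 0 - 1)
       (PySem.List.pyGetD acc.1 (PySem.List.pyGetD q 1 0 - 1) 0 + 1), acc.2)
  else if PySem.List.pyGetD q 0 0 = 2 then
    let i := PySem.List.pyGetD q 1 0 - 1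
    if 0 < PySem.List.pyGetD acc.1 i 0 then
      (PySem.List.pySetD acc.1 i (PySem.List.pyGetD acc.1 i 0 - 1), acc.2)
    else acc
  else
    let lo := max (PySem.List.pyGetD q 1 0 - 1) 0
    let hi := min (PySem.List.pyGetD q 2 0 - 1) (n - 1)
    (acc.1, acc.2 ++ [if lo ≤ hi then (PySem.List.slice acc.1 (some lo) (some (hi+1))).sum else 0])

def solve_alt (A : Int) (B : List (List Int)) : List Int :=
  (B.foldl (solveAltStep A) (List.replicate A.toNat 0, [])).2

-- ===== PRECONDITION & SPEC =====
-- Pre_solve is exactly the set of inputs on which the Python A returns: for n ≥ 1, every query must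
-- be non-empty, an update query (type 1/2) must carry an index in [1, n] (otherwise A recurses
-- forever), and a range query must have length ≥ 3 (otherwise IndexError); for n ≤ 0 the segment
-- tree list is empty and A returns only when every query is a range query whose range is neither
-- covering (IndexError at st[0]) nor overlapping the (empty) root interval [0, n-1].
def Pre_solve (A : Int) (B : List (List Int)) : Prop :=
  (1 ≤ A ∧ ∀ q ∈ B, 1 ≤ q.length ∧
      ((PySem.List.pyGetD q 0 0 = 1 ∨ PySem.List.pyGetD q 0 0 = 2) →
        2 ≤ q.length ∧ 1 ≤ PySem.List.pyGetD q 1 0 ∧ PySem.List.pyGetD q 1 0 ≤ A) ∧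
      (¬(PySem.List.pyGetD q 0 0 = 1 ∨ PySem.List.pyGetD q 0 0 = 2) → 3 ≤ q.length))
  ∨
  (A ≤ 0 ∧ ∀ q ∈ B, 3 ≤ q.length ∧
      ¬(PySem.List.pyGetD q 0 0 = 1 ∨ PySem.List.pyGetD q 0 0 = 2) ∧
      (1 < PySem.List.pyGetD q 1 0 ∨ PySem.List.pyGetD q 2 0 < A) ∧
      (A < PySem.List.pyGetD q 1 0 ∨ PySem.List.pyGetD q 2 0 < 1))
instance (A : Int) (B : List (List Int)) : Decidable (Pre_solve A B) := by
  unfold Pre_solve; infer_instance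

def pvWitness_solve : Int × List (List Int) :=
  (2, [[1, 1], [1, 2], [3, 1, 2], [2, 1], [3, 1, 2]])

def Spec_solve (A : Int) (B : List (List Int)) (out : List Int) : Prop := out = solve_alt A B
instance (A : Int) (B : List (List Int)) (out : List Int) : Decidable (Spec_solve A B out) := by
  unfold Spec_solve; infer_instance

-- ===== CLAIM (what is proved, stated in full; the proofs are below) =====
def Claim_equal_solve : Prop := ∀ (A : Int) (B : List (List Int)), Dom_solve A B → Pre_solve A B → Spec_solve A B (solve A B)

-- ===== LEMMAS AND PROOFS =====

-- heap positions of the subtree rooted at p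
inductive SubPos (p : Int) : Int → Prop
  | refl : SubPos p p
  | left {q} : SubPos p q → SubPos p (2*q+1)
  | right {q} : SubPos p q → SubPos p (2*q+2)

lemma subpos_le {p q : Int} (h : SubPos p q) (hp : 0 ≤ p) : p ≤ q ∧ 0 ≤ q := by
  induction h with
  | refl => omega
  | left _ ih => omega
  | right _ ih => omega

lemma subpos_trans {a b c : Int} (h1 : SubPos a b) (h2 : SubPos b c) : SubPos a c := by
  induction h2 with
  | refl => exact h1
  | left _ ih => exact SubPos.left ih
  | right _ ih => exact SubPos.right ih

lemma subpos_inv {a q : Int} (h : SubPos a q) :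
    q = a ∨ ∃ r, SubPos a r ∧ (q = 2*r+1 ∨ q = 2*r+2) := by
  cases h with
  | refl => exact Or.inl rfl
  | left h => exact Or.inr ⟨_, h, Or.inl rfl⟩
  | right h => exact Or.inr ⟨_, h, Or.inr rfl⟩

lemma subpos_sib {p q : Int} (hp : 0 ≤ p)
    (h1 : SubPos (2*p+1) q) (h2 : SubPos (2*p+2) q) : False := by
  revert h2
  induction h1 with
  | refl => intro h2; have := subpos_le h2 (by omega); omega
  | @left r h ih =>
      intro h2
      rcases subpos_inv h2 with h' | ⟨r', hr', h''⟩
      · omega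
      · rcases h'' with h'' | h''
        · have : r' = r := by omega
          subst this
          exact ih hr'
        · omega
  | @right r h ih =>
      intro h2
      rcases subpos_inv h2 with h' | ⟨r', hr', h''⟩
      · have := subpos_le h (by omega)
        omega
      · rcases h'' with h'' | h''
        · omega
        · have : r' = r := by omega
          subst this
          exact ih hr'

-- basic facts about pyGet?/pyGetD/pySetD at nonnegative indices
lemma pyGet?_of_nonneg (xs : List Int) {i : Int} (h0 : 0 ≤ i) :
    PySem.List.pyGet? xs i = xs[i.toNat]? := by
  simp only [PySem.List.pyGet?, PySem.List.pyIdx?, if_pos h0]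
  split
  · simp
  · next h => rw [List.getElem?_eq_none (by omega)]; rfl

lemma pyGetD_eq_of_pyGet? {xs : List Int} {i : Int} {v : Int} (h : PySem.List.pyGet? xs i = some v) :
    PySem.List.pyGetD xs i 0 = v := by
  simp [PySem.List.pyGetD, h]

lemma pyGet?_pySetD_self {xs : List Int} {p : Int} (hp : 0 ≤ p)
    (h : p.toNat < xs.length) (v : Int) :
    PySem.List.pyGet? (PySem.List.pySetD xs p v) p = some v := by
  rw [PySem.List.pySetD_of_nonneg xs v hp, pyGet?_of_nonneg _ hp]
  simp [h]

lemma pyGet?_pySetD_ne {xs : List Int} {p q : Int} (hp : 0 ≤ p) (hq : 0 ≤ q)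
    (hne : q ≠ p) (v : Int) :
    PySem.List.pyGet? (PySem.List.pySetD xs p v) q = PySem.List.pyGet? xs q := by
  rw [PySem.List.pySetD_of_nonneg xs v hp, pyGet?_of_nonneg _ hq, pyGet?_of_nonneg _ hq]
  rw [List.getElem?_set_ne (by omega)]

lemma pyGet?_isSome_lt {xs : List Int} {p v : Int} (hp : 0 ≤ p)
    (h : PySem.List.pyGet? xs p = some v) : p.toNat < xs.length := by
  rw [pyGet?_of_nonneg _ hp] at h
  exact (List.getElem?_eq_some_iff.mp h).1

lemma pyGetD_nonneg {xs : List Int} (h : ∀ x ∈ xs, 0 ≤ x) (i : Int) :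
    0 ≤ PySem.List.pyGetD xs i 0 := by
  simp only [PySem.List.pyGetD]
  cases hg : PySem.List.pyGet? xs i with
  | none => simp
  | some v =>
      simp only [Option.getD_some]
      apply h
      simp only [PySem.List.pyGet?] at hg
      rcases Option.bind_eq_some_iff.mp hg with ⟨k, _, hk⟩
      exact List.mem_of_getElem? hk

-- sum of the counts over the index interval [lo, hi]
def segSum (c : List Int) (lo hi : Int) : Int :=
  ((PySem.List.pyRange lo (hi+1) 1).map (fun i => PySem.List.pyGetD c i 0)).sum

lemma segSum_eq_zero {c : List Int} {lo hi : Int} (h : hi < lo) : segSum c lo hi = 0 := by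
  simp [segSum, PySem.List.pyRange_one_eq_nil (by omega : hi + 1 ≤ lo)]

lemma segSum_single (c : List Int) (i : Int) : segSum c i i = PySem.List.pyGetD c i 0 := by
  simp [segSum, PySem.List.pyRange_one_singleton]

lemma segSum_split (c : List Int) {lo m hi : Int} (h1 : lo ≤ m+1) (h2 : m ≤ hi) :
    segSum c lo hi = segSum c lo m + segSum c (m+1) hi := by
  unfold segSum
  rw [PySem.List.pyRange_one_append lo (m+1) (hi+1) h1 (by omega), List.map_append, List.sum_append]

lemma segSum_congr {c c' : List Int} {lo hi : Int}
    (h : ∀ i, lo ≤ i → i ≤ hi → PySem.List.pyGetD c i 0 = PySem.List.pyGetD c' i 0) :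
    segSum c lo hi = segSum c' lo hi := by
  unfold segSum
  congr 1
  apply List.map_congr_left
  intro i hi'
  rw [PySem.List.mem_pyRange_one] at hi'
  exact h i hi'.1 (by omega)

-- the segment-tree representation invariant: node pos stores the sum of counts over [s, e]
inductive ReprNode (st c : List Int) : Int → Int → Int → Prop
  | leaf {s p} : PySem.List.pyGet? st p = some (segSum c s s) → ReprNode st c s s p
  | node {s e p} (hse : s < e) :
      PySem.List.pyGet? st p = some (segSum c s e) →
      ReprNode st c s (PySem.Int.floordiv (s+e) 2) (2*p+1) →
      ReprNode st c (PySem.Int.floordiv (s+e) 2 + 1) e (2*p+2) →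
      ReprNode st c s e p

lemma reprNode_get {st c : List Int} {s e p : Int} (h : ReprNode st c s e p) :
    PySem.List.pyGet? st p = some (segSum c s e) := by
  cases h with
  | leaf h => exact h
  | node _ h _ _ => exact h

lemma mid_bounds {s e : Int} (h : s < e) :
    s ≤ PySem.Int.floordiv (s+e) 2 ∧ PySem.Int.floordiv (s+e) 2 < e := by
  rw [PySem.Int.floordiv_eq_ediv_of_pos (by norm_num : (0:Int) < 2)]
  omega

lemma reprNode_congr_st {st st' c : List Int} {s e p : Int}
    (hrep : ReprNode st c s e p)
    (h : ∀ q, SubPos p q → PySem.List.pyGet? st q = PySem.List.pyGet? st' q) :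
    ReprNode st' c s e p := by
  induction hrep with
  | @leaf s p hv => exact ReprNode.leaf ((h p SubPos.refl) ▸ hv)
  | @node s e p hse hv hl hr ihl ihr =>
      exact ReprNode.node hse ((h p SubPos.refl) ▸ hv)
        (ihl fun q hq => h q (subpos_trans (SubPos.left SubPos.refl) hq))
        (ihr fun q hq => h q (subpos_trans (SubPos.right SubPos.refl) hq))

lemma reprNode_congr_c {st c c' : List Int} {s e p : Int}
    (hrep : ReprNode st c s e p)
    (h : ∀ i, s ≤ i → i ≤ e → PySem.List.pyGetD c i 0 = PySem.List.pyGetD c' i 0) :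
    ReprNode st c' s e p := by
  induction hrep with
  | @leaf s p hv => exact ReprNode.leaf ((segSum_congr fun i h1 h2 => h i h1 h2) ▸ hv)
  | @node s e p hse hv hl hr ihl ihr =>
      have hm := mid_bounds hse
      exact ReprNode.node hse ((segSum_congr fun i h1 h2 => h i h1 h2) ▸ hv)
        (ihl fun i h1 h2 => h i h1 (by omega))
        (ihr fun i h1 h2 => h i (by omega) h2)

-- canonical-node bound: every canonical node position is in range of the 4n-element array
def Good (n s e p : Int) : Prop :=
  0 ≤ s ∧ 0 ≤ p ∧ ∃ k : ℕ, e - s + 1 ≤ (2:Int)^k ∧ (p + 2) * (2:Int)^k ≤ 4*n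

lemma good_pos_lt {n s e p : Int} (hg : Good n s e p) : 0 ≤ p ∧ p < 4*n := by
  obtain ⟨hs, hp, k, hk1, hk2⟩ := hg
  have h1 : (1:Int) ≤ 2^k := one_le_pow₀ (by norm_num)
  have h2 := le_mul_of_one_le_right (by omega : (0:Int) ≤ p + 2) h1
  omega

lemma good_children {n s e p : Int} (hg : Good n s e p) (hse : s < e) :
    Good n s (PySem.Int.floordiv (s+e) 2) (2*p+1) ∧
    Good n (PySem.Int.floordiv (s+e) 2 + 1) e (2*p+2) := by
  obtain ⟨hs, hp, k, hk1, hk2⟩ := hg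
  have hm := mid_bounds hse
  set mid := PySem.Int.floordiv (s+e) 2 with hmid
  have hmid2 : 2*mid ≤ s + e ∧ s + e ≤ 2*mid + 1 := by
    rw [hmid, PySem.Int.floordiv_eq_ediv_of_pos (by norm_num : (0:Int) < 2)]
    omega
  have hk : 1 ≤ k := by
    by_contra h
    have hk0 : k = 0 := by omega
    subst hk0
    rw [pow_zero] at hk1
    omega
  obtain ⟨k', rfl⟩ : ∃ k', k = k' + 1 := ⟨k - 1, by omega⟩
  have hpow : (2:Int)^(k'+1) = 2 * 2^k' := by ring
  have hK : (1:Int) ≤ 2^k' := one_le_pow₀ (by norm_num)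
  refine ⟨⟨hs, by omega, k', by omega, ?_⟩, ⟨by omega, by omega, k', by omega, ?_⟩⟩
  · nlinarith
  · nlinarith

lemma good_root {n : Int} (hn : 1 ≤ n) : Good n 0 (n-1) 0 := by
  refine ⟨le_refl 0, le_refl 0, Nat.clog 2 n.toNat, ?_, ?_⟩
  · have h := Nat.le_pow_clog (by norm_num : 1 < 2) n.toNat
    have : (n.toNat : Int) ≤ (2:Int)^(Nat.clog 2 n.toNat) := by exact_mod_cast h
    omega
  · rcases eq_or_lt_of_le hn with h1 | h2
    · have hn1 : n = 1 := h1.symm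
      subst hn1
      norm_num [Nat.clog_one_right]
    · have h2' : 1 < n.toNat := by omega
      have hk : 0 < Nat.clog 2 n.toNat := Nat.clog_pos (by norm_num) h2'
      obtain ⟨k', hk'⟩ : ∃ k', Nat.clog 2 n.toNat = k' + 1 := ⟨_, (Nat.succ_pred_eq_of_pos hk).symm⟩
      have h : (2:Nat)^k' < n.toNat := by
        have h0 := Nat.pow_pred_clog_lt_self (by norm_num : 1 < 2) h2'
        rw [hk'] at h0; simpa using h0
      have hI : (2:Int)^k' < (n.toNat : Int) := by exact_mod_cast h
      have hpow : (2:Int)^(k'+1) = 2 * 2^k' := by ring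
      rw [hk', hpow]
      omega

lemma pyGetD_pySetD_int {xs : List Int} {i j : Int} (hi : 0 ≤ i) (hj : 0 ≤ j)
    (hilen : i < (xs.length : Int)) (v : Int) :
    PySem.List.pyGetD (PySem.List.pySetD xs i v) j 0 =
      if j = i then v else PySem.List.pyGetD xs j 0 := by
  obtain ⟨a, rfl⟩ : ∃ a : ℕ, i = (a : Int) := ⟨i.toNat, by omega⟩
  obtain ⟨b, rfl⟩ : ∃ b : ℕ, j = (b : Int) := ⟨j.toNat, by omega⟩
  rw [PySem.List.pyGetD_pySetD_natCast xs a b v 0 (by exact_mod_cast hilen)]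
  by_cases h : b = a
  · simp [h]
  · rw [if_neg h, if_neg (by exact_mod_cast h)]

lemma pyGetD_replicate_zero (m : Nat) (i : Int) :
    PySem.List.pyGetD (List.replicate m (0:Int)) i 0 = 0 := by
  simp only [PySem.List.pyGetD]
  cases hg : PySem.List.pyGet? (List.replicate m (0:Int)) i with
  | none => rfl
  | some v =>
      simp only [Option.getD_some]
      simp only [PySem.List.pyGet?] at hg
      rcases Option.bind_eq_some_iff.mp hg with ⟨k, _, hk⟩
      exact List.eq_of_mem_replicate (List.mem_of_getElem? hk)

lemma segSum_zero {c : List Int} (h : ∀ i, PySem.List.pyGetD c i 0 = 0) (lo hi : Int) :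
    segSum c lo hi = 0 := by
  apply List.sum_eq_zero
  intro x hx
  rcases List.mem_map.mp hx with ⟨i, _, rfl⟩
  exact h i

lemma init_repr {n : Int} : ∀ (span : Nat) (s e p : Int), (e - s).toNat = span → s ≤ e →
    Good n s e p →
    ReprNode (List.replicate (4*n).toNat 0) (List.replicate n.toNat 0) s e p := by
  intro span
  induction span using Nat.strong_induction_on with
  | _ span ih =>
    intro s e p hspan hse hg
    have hz : ∀ i, PySem.List.pyGetD (List.replicate n.toNat (0:Int)) i 0 = 0 :=
      pyGetD_replicate_zero n.toNat
    have hval : PySem.List.pyGet? (List.replicate (4*n).toNat (0:Int)) p = some 0 := by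
      obtain ⟨hp0, hp4⟩ := good_pos_lt hg
      rw [pyGet?_of_nonneg _ hp0, List.getElem?_replicate, if_pos (by omega)]
    rcases eq_or_lt_of_le hse with heq | hlt
    · subst heq
      exact ReprNode.leaf (by rw [segSum_zero hz]; exact hval)
    · obtain ⟨hgl, hgr⟩ := good_children hg hlt
      have hm := mid_bounds hlt
      exact ReprNode.node hlt (by rw [segSum_zero hz]; exact hval)
        (ih (PySem.Int.floordiv (s+e) 2 - s).toNat (by omega) _ _ _ rfl (by omega) hgl)
        (ih (e - (PySem.Int.floordiv (s+e) 2 + 1)).toNat (by omega) _ _ _ rfl (by omega) hgr)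

lemma update1_spec (c : List Int) (idx : Int) (hcl : idx < (c.length : Int)) :
    ∀ (f : Nat) (st : List Int) (s e p : Int),
    (e - s).toNat + 1 ≤ f → 0 ≤ s → s ≤ idx → idx ≤ e → 0 ≤ p →
    ReprNode st c s e p →
    ReprNode (update1 f st s e idx p)
      (PySem.List.pySetD c idx (PySem.List.pyGetD c idx 0 + 1)) s e p
    ∧ (∀ q, 0 ≤ q → ¬ SubPos p q →
        PySem.List.pyGet? (update1 f st s e idx p) q = PySem.List.pyGet? st q) := by
  intro f
  induction f with
  | zero => intro st s e p hf; omega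
  | succ f ih =>
    intro st s e p hf hs hsi hie hp hrep
    by_cases hse : s = e
    · subst hse
      have hidx : idx = s := le_antisymm hie hsi
      have heq : update1 (f+1) st s s idx p =
          PySem.List.pySetD st p (PySem.List.pyGetD st p 0 + 1) := by
        simp only [update1]
        rw [if_pos ⟨trivial, hidx.symm⟩]
      rw [heq]
      have hv := reprNode_get hrep
      have hlt := pyGet?_isSome_lt hp hv
      constructor
      · apply ReprNode.leaf
        rw [pyGet?_pySetD_self hp hlt, pyGetD_eq_of_pyGet? hv, segSum_single, segSum_single]
        subst hidx
        rw [pyGetD_pySetD_int (by omega) (by omega) hcl, if_pos rfl]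
      · intro q hq hnsp
        exact pyGet?_pySetD_ne hp hq (fun h => hnsp (h ▸ SubPos.refl)) _
    · have hlt : s < e := by omega
      have hm := mid_bounds hlt
      set mid := PySem.Int.floordiv (s+e) 2 with hmid
      cases hrep with
      | leaf hv => exact absurd rfl hse
      | node hse' hv hl hr =>
        have hnc : ¬(s = e ∧ s = idx) := fun h => hse h.1
        by_cases hb : idx ≤ mid
        · have heq : update1 (f+1) st s e idx p =
              PySem.List.pySetD (update1 f st s mid idx (2*p+1)) p
                (PySem.List.pyGetD (update1 f st s mid idx (2*p+1)) (2*p+1) 0 +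
                 PySem.List.pyGetD (update1 f st s mid idx (2*p+1)) (2*p+2) 0) := by
            simp only [update1, if_neg hnc, ← hmid, if_pos hb]
          obtain ⟨R1, F1⟩ := ih st s mid (2*p+1) (by omega) hs hsi hb (by omega) hl
          set st1 := update1 f st s mid idx (2*p+1) with hst1
          have hnsp1 : ∀ q, SubPos (2*p+2) q → ¬ SubPos (2*p+1) q :=
            fun q hq h' => subpos_sib hp h' hq
          have hr1 : ReprNode st1 c (mid+1) e (2*p+2) :=
            reprNode_congr_st hr (fun q hq =>
              (F1 q (subpos_le hq (by omega)).2 (hnsp1 q hq)).symm)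
          have hr2 : ReprNode st1 (PySem.List.pySetD c idx (PySem.List.pyGetD c idx 0 + 1))
              (mid+1) e (2*p+2) :=
            reprNode_congr_c hr1 (fun i h1 h2 => by
              rw [pyGetD_pySetD_int (by omega) (by omega) hcl, if_neg (by omega)])
          have hvl := reprNode_get R1
          have hvr := reprNode_get hr2
          have hFp : PySem.List.pyGet? st1 p = PySem.List.pyGet? st p :=
            F1 p hp (fun h => by have := subpos_le h (by omega); omega)
          have hplen : p.toNat < st1.length := pyGet?_isSome_lt hp (hFp.trans hv)
          rw [heq]
          constructor
          · apply ReprNode.node hlt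
            · rw [pyGet?_pySetD_self hp hplen, pyGetD_eq_of_pyGet? hvl,
                pyGetD_eq_of_pyGet? hvr, ← segSum_split _ (by omega) (by omega)]
            · exact reprNode_congr_st R1 (fun q hq => by
                have hq0 := subpos_le hq (by omega)
                exact (pyGet?_pySetD_ne hp (by omega) (by omega) _).symm)
            · exact reprNode_congr_st hr2 (fun q hq => by
                have hq0 := subpos_le hq (by omega)
                exact (pyGet?_pySetD_ne hp (by omega) (by omega) _).symm)
          · intro q hq hnsp
            have hne : q ≠ p := fun h => hnsp (h ▸ SubPos.refl)
            rw [pyGet?_pySetD_ne hp hq hne]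
            exact F1 q hq (fun h => hnsp (subpos_trans (SubPos.left SubPos.refl) h))
        · have heq : update1 (f+1) st s e idx p =
              PySem.List.pySetD (update1 f st (mid+1) e idx (2*p+2)) p
                (PySem.List.pyGetD (update1 f st (mid+1) e idx (2*p+2)) (2*p+1) 0 +
                 PySem.List.pyGetD (update1 f st (mid+1) e idx (2*p+2)) (2*p+2) 0) := by
            simp only [update1, if_neg hnc, ← hmid, if_neg hb]
          obtain ⟨R1, F1⟩ := ih st (mid+1) e (2*p+2) (by omega) (by omega) (by omega) hie (by omega) hr
          set st1 := update1 f st (mid+1) e idx (2*p+2) with hst1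
          have hl1 : ReprNode st1 c s mid (2*p+1) :=
            reprNode_congr_st hl (fun q hq =>
              (F1 q (subpos_le hq (by omega)).2 (fun h' => subpos_sib hp hq h')).symm)
          have hl2 : ReprNode st1 (PySem.List.pySetD c idx (PySem.List.pyGetD c idx 0 + 1))
              s mid (2*p+1) :=
            reprNode_congr_c hl1 (fun i h1 h2 => by
              rw [pyGetD_pySetD_int (by omega) (by omega) hcl, if_neg (by omega)])
          have hvl := reprNode_get hl2
          have hvr := reprNode_get R1
          have hFp : PySem.List.pyGet? st1 p = PySem.List.pyGet? st p :=
            F1 p hp (fun h => by have := subpos_le h (by omega); omega)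
          have hplen : p.toNat < st1.length := pyGet?_isSome_lt hp (hFp.trans hv)
          rw [heq]
          constructor
          · apply ReprNode.node hlt
            · rw [pyGet?_pySetD_self hp hplen, pyGetD_eq_of_pyGet? hvl,
                pyGetD_eq_of_pyGet? hvr, ← segSum_split _ (by omega) (by omega)]
            · exact reprNode_congr_st hl2 (fun q hq => by
                have hq0 := subpos_le hq (by omega)
                exact (pyGet?_pySetD_ne hp (by omega) (by omega) _).symm)
            · exact reprNode_congr_st R1 (fun q hq => by
                have hq0 := subpos_le hq (by omega)
                exact (pyGet?_pySetD_ne hp (by omega) (by omega) _).symm)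
          · intro q hq hnsp
            have hne : q ≠ p := fun h => hnsp (h ▸ SubPos.refl)
            rw [pyGet?_pySetD_ne hp hq hne]
            exact F1 q hq (fun h => hnsp (subpos_trans (SubPos.right SubPos.refl) h))

lemma update2_spec (c : List Int) (idx : Int) (hcl : idx < (c.length : Int)) :
    ∀ (f : Nat) (st : List Int) (s e p : Int),
    (e - s).toNat + 1 ≤ f → 0 ≤ s → s ≤ idx → idx ≤ e → 0 ≤ p →
    ReprNode st c s e p →
    ReprNode (update2 f st s e idx p)
      (PySem.List.pySetD c idx (max 0 (PySem.List.pyGetD c idx 0 - 1))) s e p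
    ∧ (∀ q, 0 ≤ q → ¬ SubPos p q →
        PySem.List.pyGet? (update2 f st s e idx p) q = PySem.List.pyGet? st q) := by
  intro f
  induction f with
  | zero => intro st s e p hf; omega
  | succ f ih =>
    intro st s e p hf hs hsi hie hp hrep
    by_cases hse : s = e
    · subst hse
      have hidx : idx = s := le_antisymm hie hsi
      have heq : update2 (f+1) st s s idx p =
          PySem.List.pySetD (PySem.List.pySetD st p (PySem.List.pyGetD st p 0 - 1)) p
            (max 0 (PySem.List.pyGetD
              (PySem.List.pySetD st p (PySem.List.pyGetD st p 0 - 1)) p 0)) := by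
        simp only [update2]
        rw [if_pos ⟨trivial, hidx.symm⟩]
      rw [heq]
      have hv := reprNode_get hrep
      have hlt := pyGet?_isSome_lt hp hv
      have hlt1 : p.toNat < (PySem.List.pySetD st p (PySem.List.pyGetD st p 0 - 1)).length := by
        rw [PySem.List.length_pySetD]; exact hlt
      have h1 : PySem.List.pyGetD (PySem.List.pySetD st p (PySem.List.pyGetD st p 0 - 1)) p 0 =
          PySem.List.pyGetD st p 0 - 1 := by
        rw [pyGetD_pySetD_int hp hp (by omega), if_pos rfl]
      constructor
      · apply ReprNode.leaf
        rw [pyGet?_pySetD_self hp hlt1, h1, pyGetD_eq_of_pyGet? hv, segSum_single, segSum_single]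
        subst hidx
        rw [pyGetD_pySetD_int (by omega) (by omega) hcl, if_pos rfl]
      · intro q hq hnsp
        have hne : q ≠ p := fun h => hnsp (h ▸ SubPos.refl)
        rw [pyGet?_pySetD_ne hp hq hne, pyGet?_pySetD_ne hp hq hne]
    · have hlt : s < e := by omega
      have hm := mid_bounds hlt
      set mid := PySem.Int.floordiv (s+e) 2 with hmid
      cases hrep with
      | leaf hv => exact absurd rfl hse
      | node hse' hv hl hr =>
        have hnc : ¬(s = e ∧ s = idx) := fun h => hse h.1
        by_cases hb : idx ≤ mid
        · have heq : update2 (f+1) st s e idx p =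
              PySem.List.pySetD (update2 f st s mid idx (2*p+1)) p
                (PySem.List.pyGetD (update2 f st s mid idx (2*p+1)) (2*p+1) 0 +
                 PySem.List.pyGetD (update2 f st s mid idx (2*p+1)) (2*p+2) 0) := by
            simp only [update2, if_neg hnc, ← hmid, if_pos hb]
          obtain ⟨R1, F1⟩ := ih st s mid (2*p+1) (by omega) hs hsi hb (by omega) hl
          set st1 := update2 f st s mid idx (2*p+1) with hst1
          have hr1 : ReprNode st1 c (mid+1) e (2*p+2) :=
            reprNode_congr_st hr (fun q hq =>
              (F1 q (subpos_le hq (by omega)).2 (fun h' => subpos_sib hp h' hq)).symm)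
          have hr2 : ReprNode st1
              (PySem.List.pySetD c idx (max 0 (PySem.List.pyGetD c idx 0 - 1))) (mid+1) e (2*p+2) :=
            reprNode_congr_c hr1 (fun i h1 h2 => by
              rw [pyGetD_pySetD_int (by omega) (by omega) hcl, if_neg (by omega)])
          have hvl := reprNode_get R1
          have hvr := reprNode_get hr2
          have hFp : PySem.List.pyGet? st1 p = PySem.List.pyGet? st p :=
            F1 p hp (fun h => by have := subpos_le h (by omega); omega)
          have hplen : p.toNat < st1.length := pyGet?_isSome_lt hp (hFp.trans hv)
          rw [heq]
          constructor
          · apply ReprNode.node hlt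
            · rw [pyGet?_pySetD_self hp hplen, pyGetD_eq_of_pyGet? hvl,
                pyGetD_eq_of_pyGet? hvr, ← segSum_split _ (by omega) (by omega)]
            · exact reprNode_congr_st R1 (fun q hq => by
                have hq0 := subpos_le hq (by omega)
                exact (pyGet?_pySetD_ne hp (by omega) (by omega) _).symm)
            · exact reprNode_congr_st hr2 (fun q hq => by
                have hq0 := subpos_le hq (by omega)
                exact (pyGet?_pySetD_ne hp (by omega) (by omega) _).symm)
          · intro q hq hnsp
            have hne : q ≠ p := fun h => hnsp (h ▸ SubPos.refl)
            rw [pyGet?_pySetD_ne hp hq hne]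
            exact F1 q hq (fun h => hnsp (subpos_trans (SubPos.left SubPos.refl) h))
        · have heq : update2 (f+1) st s e idx p =
              PySem.List.pySetD (update2 f st (mid+1) e idx (2*p+2)) p
                (PySem.List.pyGetD (update2 f st (mid+1) e idx (2*p+2)) (2*p+1) 0 +
                 PySem.List.pyGetD (update2 f st (mid+1) e idx (2*p+2)) (2*p+2) 0) := by
            simp only [update2, if_neg hnc, ← hmid, if_neg hb]
          obtain ⟨R1, F1⟩ := ih st (mid+1) e (2*p+2) (by omega) (by omega) (by omega) hie (by omega) hr
          set st1 := update2 f st (mid+1) e idx (2*p+2) with hst1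
          have hl1 : ReprNode st1 c s mid (2*p+1) :=
            reprNode_congr_st hl (fun q hq =>
              (F1 q (subpos_le hq (by omega)).2 (fun h' => subpos_sib hp hq h')).symm)
          have hl2 : ReprNode st1
              (PySem.List.pySetD c idx (max 0 (PySem.List.pyGetD c idx 0 - 1))) s mid (2*p+1) :=
            reprNode_congr_c hl1 (fun i h1 h2 => by
              rw [pyGetD_pySetD_int (by omega) (by omega) hcl, if_neg (by omega)])
          have hvl := reprNode_get hl2
          have hvr := reprNode_get R1
          have hFp : PySem.List.pyGet? st1 p = PySem.List.pyGet? st p :=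
            F1 p hp (fun h => by have := subpos_le h (by omega); omega)
          have hplen : p.toNat < st1.length := pyGet?_isSome_lt hp (hFp.trans hv)
          rw [heq]
          constructor
          · apply ReprNode.node hlt
            · rw [pyGet?_pySetD_self hp hplen, pyGetD_eq_of_pyGet? hvl,
                pyGetD_eq_of_pyGet? hvr, ← segSum_split _ (by omega) (by omega)]
            · exact reprNode_congr_st hl2 (fun q hq => by
                have hq0 := subpos_le hq (by omega)
                exact (pyGet?_pySetD_ne hp (by omega) (by omega) _).symm)
            · exact reprNode_congr_st R1 (fun q hq => by
                have hq0 := subpos_le hq (by omega)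
                exact (pyGet?_pySetD_ne hp (by omega) (by omega) _).symm)
          · intro q hq hnsp
            have hne : q ≠ p := fun h => hnsp (h ▸ SubPos.refl)
            rw [pyGet?_pySetD_ne hp hq hne]
            exact F1 q hq (fun h => hnsp (subpos_trans (SubPos.right SubPos.refl) h))

lemma rangeCount_eq {st c : List Int} : ∀ (span : Nat) (rs re s e p : Int),
    (e - s).toNat = span → ReprNode st c s e p →
    rangeCount st rs re s e p = segSum c (max rs s) (min re e) := by
  intro span
  induction span using Nat.strong_induction_on with
  | _ span ih =>
    intro rs re s e p hspan hrep
    rw [rangeCount]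
    split
    · next hcov =>
        rw [pyGetD_eq_of_pyGet? (reprNode_get hrep),
          show max rs s = s by omega, show min re e = e by omega]
    · next hncov =>
        split
        · next hdis => rw [segSum_eq_zero (by omega)]
        · next hndis =>
            have hlt : s < e := by omega
            cases hrep with
            | leaf hv => omega
            | node hse' hv hl hr =>
              have hm := mid_bounds hlt
              set mid := PySem.Int.floordiv (s+e) 2 with hmid
              rw [ih (mid - s).toNat (by omega) rs re s mid (2*p+1) rfl hl,
                ih (e - (mid+1)).toNat (by omega) rs re (mid+1) e (2*p+2) rfl hr]
              by_cases hre : re ≤ mid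
              · rw [segSum_eq_zero (show min re e < max rs (mid+1) by omega), add_zero,
                  show min re mid = min re e by omega]
              · by_cases hrs : rs ≤ mid+1
                · rw [show min re mid = mid by omega, show max rs (mid+1) = mid+1 by omega,
                    ← segSum_split c (show max rs s ≤ mid+1 by omega) (show mid ≤ min re e by omega)]
                · rw [segSum_eq_zero (show min re mid < max rs s by omega), zero_add,
                    show max rs (mid+1) = max rs s by omega]

lemma take_drop_sum {c : List Int} : ∀ (k : Nat) (lo hi : Int), 0 ≤ lo → lo + k = hi + 1 →
    hi < (c.length : Int) →
    ((c.drop lo.toNat).take k).sum = segSum c lo hi := by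
  intro k
  induction k with
  | zero =>
      intro lo hi h0 hk hlen
      rw [List.take_zero, List.sum_nil, segSum_eq_zero (by omega)]
  | succ k ihk =>
      intro lo hi h0 hk hlen
      have hlo : lo.toNat < c.length := by omega
      rw [List.drop_eq_getElem_cons hlo, List.take_succ_cons, List.sum_cons,
        show lo.toNat + 1 = (lo + 1).toNat by omega,
        ihk (lo+1) hi (by omega) (by omega) hlen]
      unfold segSum
      rw [PySem.List.pyRange_one_cons (by omega : lo < hi + 1), List.map_cons, List.sum_cons,
        PySem.List.pyGetD_eq_getElem c 0 h0 (by omega)]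

lemma slice_sum_eq_segSum {c : List Int} {lo hi : Int} (h0 : 0 ≤ lo) (hlo : lo ≤ hi)
    (hhi : hi < (c.length : Int)) :
    (PySem.List.slice c (some lo) (some (hi+1))).sum = segSum c lo hi := by
  rw [PySem.List.slice_toNat c h0 (by omega : (0:Int) ≤ hi + 1)]
  exact take_drop_sum ((hi+1).toNat - lo.toNat) lo hi h0 (by omega) hhi

lemma fold_eq_pos {n : Int} (hn : 1 ≤ n) :
    ∀ (qs : List (List Int)) (st cnt ans : List Int),
    (∀ q ∈ qs, 1 ≤ q.length ∧
      ((PySem.List.pyGetD q 0 0 = 1 ∨ PySem.List.pyGetD q 0 0 = 2) →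
        2 ≤ q.length ∧ 1 ≤ PySem.List.pyGetD q 1 0 ∧ PySem.List.pyGetD q 1 0 ≤ n) ∧
      (¬(PySem.List.pyGetD q 0 0 = 1 ∨ PySem.List.pyGetD q 0 0 = 2) → 3 ≤ q.length)) →
    (cnt.length : Int) = n → (∀ x ∈ cnt, 0 ≤ x) →
    ReprNode st cnt 0 (n-1) 0 →
    (qs.foldl (solveStep n) (st, ans)).2 = (qs.foldl (solveAltStep n) (cnt, ans)).2 := by
  intro qs
  induction qs with
  | nil => intro st cnt ans _ _ _ _; rfl
  | cons q qs ihq =>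
    intro st cnt ans hq hlen hpos hrep
    obtain ⟨hq1, hq2, hq3⟩ := hq q (List.mem_cons_self ..)
    have hqs' := fun q' h' => hq q' (List.mem_cons_of_mem _ h')
    rw [List.foldl_cons, List.foldl_cons]
    by_cases h1 : PySem.List.pyGetD q 0 0 = 1
    · obtain ⟨hl2, hx1, hx2⟩ := hq2 (Or.inl h1)
      have hi0 : 0 ≤ PySem.List.pyGetD q 1 0 - 1 := by omega
      obtain ⟨R, F⟩ := update1_spec cnt (PySem.List.pyGetD q 1 0 - 1) (by omega)
        n.toNat st 0 (n-1) 0 (by omega) (by omega) (by omega) (by omega) (by omega) hrep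
      have hstepA : solveStep n (st, ans) q =
          (update1 n.toNat st 0 (n-1) (PySem.List.pyGetD q 1 0 - 1) 0, ans) := by
        simp only [solveStep, if_pos h1]
      have hstepB : solveAltStep n (cnt, ans) q =
          (PySem.List.pySetD cnt (PySem.List.pyGetD q 1 0 - 1)
            (PySem.List.pyGetD cnt (PySem.List.pyGetD q 1 0 - 1) 0 + 1), ans) := by
        simp only [solveAltStep, if_pos h1]
      rw [hstepA, hstepB]
      apply ihq _ _ _ hqs'
      · rw [PySem.List.length_pySetD]; exact hlen
      · intro x hx
        rw [PySem.List.pySetD_of_nonneg _ _ hi0] at hx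
        rcases List.mem_or_eq_of_mem_set hx with h | h
        · exact hpos x h
        · have := pyGetD_nonneg hpos (PySem.List.pyGetD q 1 0 - 1); omega
      · exact R
    · by_cases h2 : PySem.List.pyGetD q 0 0 = 2
      · obtain ⟨hl2, hx1, hx2⟩ := hq2 (Or.inr h2)
        have hi0 : 0 ≤ PySem.List.pyGetD q 1 0 - 1 := by omega
        obtain ⟨R, F⟩ := update2_spec cnt (PySem.List.pyGetD q 1 0 - 1) (by omega)
          n.toNat st 0 (n-1) 0 (by omega) (by omega) (by omega) (by omega) (by omega) hrep
        have hstepA : solveStep n (st, ans) q =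
            (update2 n.toNat st 0 (n-1) (PySem.List.pyGetD q 1 0 - 1) 0, ans) := by
          simp only [solveStep, if_neg h1, if_pos h2]
        have hv := pyGetD_nonneg hpos (PySem.List.pyGetD q 1 0 - 1)
        by_cases hvp : 0 < PySem.List.pyGetD cnt (PySem.List.pyGetD q 1 0 - 1) 0
        · have hstepB : solveAltStep n (cnt, ans) q =
              (PySem.List.pySetD cnt (PySem.List.pyGetD q 1 0 - 1)
                (PySem.List.pyGetD cnt (PySem.List.pyGetD q 1 0 - 1) 0 - 1), ans) := by
            simp only [solveAltStep, if_neg h1, if_pos h2, if_pos hvp]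
          rw [hstepA, hstepB]
          apply ihq _ _ _ hqs'
          · rw [PySem.List.length_pySetD]; exact hlen
          · intro x hx
            rw [PySem.List.pySetD_of_nonneg _ _ hi0] at hx
            rcases List.mem_or_eq_of_mem_set hx with h | h
            · exact hpos x h
            · omega
          · rw [show max 0 (PySem.List.pyGetD cnt (PySem.List.pyGetD q 1 0 - 1) 0 - 1) =
                PySem.List.pyGetD cnt (PySem.List.pyGetD q 1 0 - 1) 0 - 1 by omega] at R
            exact R
        · have hv0 : PySem.List.pyGetD cnt (PySem.List.pyGetD q 1 0 - 1) 0 = 0 := by omega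
          have hstepB : solveAltStep n (cnt, ans) q = (cnt, ans) := by
            simp only [solveAltStep, if_neg h1, if_pos h2, if_neg hvp]
          rw [hstepA, hstepB]
          apply ihq _ _ _ hqs' hlen hpos
          apply reprNode_congr_c R
          intro j hj1 hj2
          rw [pyGetD_pySetD_int hi0 (by omega) (by omega)]
          by_cases hji : j = PySem.List.pyGetD q 1 0 - 1
          · rw [if_pos hji, hji, hv0]
            omega
          · rw [if_neg hji]
      · have hstepA : solveStep n (st, ans) q =
            (st, ans ++ [rangeCount st (PySem.List.pyGetD q 1 0 - 1)
              (PySem.List.pyGetD q 2 0 - 1) 0 (n-1) 0]) := by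
          simp only [solveStep, if_neg h1, if_neg h2]
        have hstepB : solveAltStep n (cnt, ans) q =
            (cnt, ans ++ [if max (PySem.List.pyGetD q 1 0 - 1) 0 ≤
                min (PySem.List.pyGetD q 2 0 - 1) (n-1) then
              (PySem.List.slice cnt (some (max (PySem.List.pyGetD q 1 0 - 1) 0))
                (some (min (PySem.List.pyGetD q 2 0 - 1) (n-1) + 1))).sum else 0]) := by
          simp only [solveAltStep, if_neg h1, if_neg h2]
        rw [hstepA, hstepB]
        have hval : rangeCount st (PySem.List.pyGetD q 1 0 - 1)
            (PySem.List.pyGetD q 2 0 - 1) 0 (n-1) 0 =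
            (if max (PySem.List.pyGetD q 1 0 - 1) 0 ≤
                min (PySem.List.pyGetD q 2 0 - 1) (n-1) then
              (PySem.List.slice cnt (some (max (PySem.List.pyGetD q 1 0 - 1) 0))
                (some (min (PySem.List.pyGetD q 2 0 - 1) (n-1) + 1))).sum else 0) := by
          rw [rangeCount_eq ((n-1) - (0:Int)).toNat _ _ 0 (n-1) 0 rfl hrep]
          by_cases hc : max (PySem.List.pyGetD q 1 0 - 1) 0 ≤
              min (PySem.List.pyGetD q 2 0 - 1) (n-1)
          · rw [if_pos hc, slice_sum_eq_segSum (by omega) hc (by omega)]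
          · rw [if_neg hc, segSum_eq_zero (by omega)]
        rw [hval]
        exact ihq _ _ _ hqs' hlen hpos hrep

lemma fold_eq_nonpos {n : Int} (hn : n ≤ 0) :
    ∀ (qs : List (List Int)) (st cnt ans : List Int),
    (∀ q ∈ qs, 3 ≤ q.length ∧
      ¬(PySem.List.pyGetD q 0 0 = 1 ∨ PySem.List.pyGetD q 0 0 = 2) ∧
      (1 < PySem.List.pyGetD q 1 0 ∨ PySem.List.pyGetD q 2 0 < n) ∧
      (n < PySem.List.pyGetD q 1 0 ∨ PySem.List.pyGetD q 2 0 < 1)) →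
    (qs.foldl (solveStep n) (st, ans)).2 = (qs.foldl (solveAltStep n) (cnt, ans)).2 := by
  intro qs
  induction qs with
  | nil => intro st cnt ans _; rfl
  | cons q qs ihq =>
    intro st cnt ans hq
    obtain ⟨hq1, hq2, hq3, hq4⟩ := hq q (List.mem_cons_self ..)
    have hqs' := fun q' h' => hq q' (List.mem_cons_of_mem _ h')
    have h1 : ¬(PySem.List.pyGetD q 0 0 = 1) := fun h => hq2 (Or.inl h)
    have h2 : ¬(PySem.List.pyGetD q 0 0 = 2) := fun h => hq2 (Or.inr h)
    rw [List.foldl_cons, List.foldl_cons]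
    have hrc : rangeCount st (PySem.List.pyGetD q 1 0 - 1)
        (PySem.List.pyGetD q 2 0 - 1) 0 (n-1) 0 = 0 := by
      rw [rangeCount, if_neg (by omega), if_pos (by omega)]
    have hA : solveStep n (st, ans) q = (st, ans ++ [0]) := by
      simp only [solveStep, if_neg h1, if_neg h2, hrc]
    have hB : solveAltStep n (cnt, ans) q = (cnt, ans ++ [0]) := by
      simp only [solveAltStep, if_neg h1, if_neg h2]
      rw [if_neg (show ¬(max (PySem.List.pyGetD q 1 0 - 1) 0 ≤
        min (PySem.List.pyGetD q 2 0 - 1) (n-1)) by omega)]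
    rw [hA, hB]
    exact ihq _ _ _ hqs'

-- ===== VERDICT (by name: the statement is the Claim_ definition above) =====
theorem solve_spec : Claim_equal_solve := by
  intro A B _ hpre
  unfold Spec_solve solve solve_alt
  rcases hpre with ⟨hn, hq⟩ | ⟨hn, hq⟩
  · have hst0 : ((PySem.List.pyRange 0 (4*A) 1).map fun _ => (0:Int)) =
        List.replicate (4*A).toNat 0 := by
      rw [List.map_const']
      rw [PySem.List.length_pyRange_one]
      norm_num
    rw [hst0]
    exact fold_eq_pos hn B _ _ [] hq
      (by rw [List.length_replicate]; omega)
      (by intro x hx; rw [List.mem_replicate] at hx; omega)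
      (init_repr ((A-1) - (0:Int)).toNat 0 (A-1) 0 rfl (by omega) (good_root hn))
  · exact fold_eq_nonpos hn B _ _ [] hq
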